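-- pv_equiv track=rewrite | github.com/sueszli/vector-database-benchmark | dataset/python-mutated/fenced_code.py | format_quote
-- ===== SOURCE A (Python) =====
-- def format_quote(text: str) -> str:
--     if False:
--         while True:
--             i = 10
--     paragraphs = text.split('\n')
--     quoted_paragraphs = []
--     for paragraph in paragraphs:
--         lines = paragraph.split('\n')
--         quoted_paragraphs.append('\n'.join(('> ' + line for line in lines)))
--     return '\n'.join(quoted_paragraphs)
-- ===== SOURCE B (Python) =====
-- def format_quote(text: str) -> str:
--     return '> ' + text.replace('\n', '\n> ')
-- ===== Notes on version B (the rewrite author's own statement) =====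
-- stated objective: idiomatic
-- what changed: Replaced the split-into-paragraphs / inner-split / prefix-each-line / double-join pipeline with a single expression that prepends the marker once and rewrites every newline as newline-plus-marker via str.replace.
import Mathlib
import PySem

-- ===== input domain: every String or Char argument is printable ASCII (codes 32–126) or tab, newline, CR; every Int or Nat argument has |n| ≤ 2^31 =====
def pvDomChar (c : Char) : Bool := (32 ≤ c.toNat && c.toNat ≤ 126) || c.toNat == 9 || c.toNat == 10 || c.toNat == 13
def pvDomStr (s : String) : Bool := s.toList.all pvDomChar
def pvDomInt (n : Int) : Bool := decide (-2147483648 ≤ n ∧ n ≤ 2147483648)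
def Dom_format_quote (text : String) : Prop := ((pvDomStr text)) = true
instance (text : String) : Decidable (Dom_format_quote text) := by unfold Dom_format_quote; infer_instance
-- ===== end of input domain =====

-- B prepends the quote marker once and rewrites every newline with str.replace, instead of A's
-- split / per-paragraph re-split / prefix-each-line / double-join pipeline (idiomatic one-liner).

-- ===== PORT A =====
def format_quote (text : String) : String :=
  let paragraphs := (PySem.Str.split? text "\n").getD []   -- sep "\n" ≠ "", so split? is always some
  let quoted_paragraphs := paragraphs.foldl (fun acc paragraph =>
    let lines := (PySem.Str.split? paragraph "\n").getD []
    acc ++ [PySem.Str.join "\n" (lines.map (fun line => "> " ++ line))]) []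
  PySem.Str.join "\n" quoted_paragraphs

-- ===== PORT B =====
def format_quote_alt (text : String) : String :=
  "> " ++ PySem.Str.replace text "\n" "\n> "

-- ===== PRECONDITION & SPEC =====
def Spec_format_quote (text : String) (out : String) : Prop := out = format_quote_alt text
instance (text : String) (out : String) : Decidable (Spec_format_quote text out) := by unfold Spec_format_quote; infer_instance

-- ===== CLAIM (what is proved, stated in full; the proofs are below) =====
def Claim_equal_format_quote : Prop := ∀ (text : String), Dom_format_quote text → Spec_format_quote text (format_quote text)

-- ===== LEMMAS AND PROOFS =====

/-- Reference version of `replace cs "\n" "\n> "` on char lists. -/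
def qRepl : List Char → List Char
  | [] => []
  | c :: t => if c = '\n' then '\n' :: '>' :: ' ' :: qRepl t else c :: qRepl t

/-- Reference version of split-on-newline with the current piece accumulated in reverse. -/
def qSplit : List Char → List Char → List (List Char)
  | [], cur => [cur.reverse]
  | c :: t, cur => if c = '\n' then cur.reverse :: qSplit t [] else qSplit t (c :: cur)

theorem qSplit_ne_nil (cs cur : List Char) : qSplit cs cur ≠ [] := by
  induction cs generalizing cur with
  | nil => simp [qSplit]
  | cons c t ih => simp only [qSplit]; split_ifs <;> simp [ih]

theorem replace_go_eq (l : List Char) (acc : List Char) (fuel : Nat) (h : l.length ≤ fuel) :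
    PySem.Chars.replace.go ['\n'] ['\n', '>', ' '] fuel l acc = acc.reverse ++ qRepl l := by
  induction l generalizing acc fuel with
  | nil => cases fuel <;> simp [PySem.Chars.replace.go, qRepl]
  | cons c t ih =>
    cases fuel with
    | zero => simp at h
    | succ f =>
      simp only [List.length_cons, Nat.succ_le_succ_iff] at h
      by_cases hc : c = '\n'
      · subst hc
        simp only [PySem.Chars.replace.go, List.isPrefixOf,
          Bool.and_true, beq_self_eq_true, if_true, List.length_cons, List.drop_succ_cons,
          List.length_nil, List.drop_zero]
        rw [ih _ f h]
        simp [qRepl]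
      · have hb : ('\n' == c) = false := beq_eq_false_iff_ne.mpr (fun h' => hc h'.symm)
        simp only [PySem.Chars.replace.go, List.isPrefixOf,
          Bool.and_true, hb, Bool.false_eq_true, if_false]
        rw [ih _ f h]
        simp [qRepl, hc]

theorem splitOn_go_eq (l cur : List Char) (accL : List (List Char)) (fuel : Nat)
    (h : l.length ≤ fuel) :
    PySem.Chars.splitOn.go ['\n'] fuel l cur accL = accL.reverse ++ qSplit l cur := by
  induction l generalizing cur accL fuel with
  | nil => cases fuel <;> simp [PySem.Chars.splitOn.go, qSplit]
  | cons c t ih =>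
    cases fuel with
    | zero => simp at h
    | succ f =>
      simp only [List.length_cons, Nat.succ_le_succ_iff] at h
      by_cases hc : c = '\n'
      · subst hc
        simp only [PySem.Chars.splitOn.go, List.isPrefixOf,
          Bool.and_true, beq_self_eq_true, if_true, List.length_cons, List.drop_succ_cons,
          List.length_nil, List.drop_zero]
        rw [ih _ _ f h]
        simp [qSplit]
      · have hb : ('\n' == c) = false := beq_eq_false_iff_ne.mpr (fun h' => hc h'.symm)
        simp only [PySem.Chars.splitOn.go, List.isPrefixOf,
          Bool.and_true, hb, Bool.false_eq_true, if_false]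
        rw [ih _ _ f h]
        simp [qSplit, hc]

theorem splitOn_eq (cs : List Char) : PySem.Chars.splitOn cs ['\n'] = qSplit cs [] := by
  unfold PySem.Chars.splitOn
  rw [splitOn_go_eq _ _ _ _ (by omega)]
  simp

theorem replace_eq (cs : List Char) :
    PySem.Chars.replace cs ['\n'] ['\n', '>', ' '] = qRepl cs := by
  unfold PySem.Chars.replace
  rw [if_neg (by simp), replace_go_eq _ _ _ (le_refl _)]
  simp

theorem qSplit_no_newline (cs cur : List Char) (h : '\n' ∉ cs) :
    qSplit cs cur = [cur.reverse ++ cs] := by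
  induction cs generalizing cur with
  | nil => simp [qSplit]
  | cons c t ih =>
    simp only [List.mem_cons, not_or] at h
    have hc : ¬ c = '\n' := fun hc => h.1 hc.symm
    simp only [qSplit, if_neg hc]
    rw [ih _ h.2]
    simp

theorem qSplit_pieces_no_newline (cs cur : List Char) (hcur : '\n' ∉ cur) :
    ∀ p ∈ qSplit cs cur, '\n' ∉ p := by
  induction cs generalizing cur with
  | nil =>
    intro p hp
    simp only [qSplit, List.mem_singleton] at hp
    subst hp; simpa using hcur
  | cons c t ih =>
    by_cases hc : c = '\n'
    · subst hc
      simp only [qSplit, if_true]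
      intro p hp
      rcases List.mem_cons.mp hp with rfl | hp
      · simpa using hcur
      · exact ih [] (by simp) p hp
    · simp only [qSplit, if_neg hc]
      refine ih (c :: cur) ?_
      intro h
      rcases List.mem_cons.mp h with h | h
      · exact hc h.symm
      · exact hcur h

theorem join_map_qSplit (cs cur : List Char) :
    PySem.Chars.join ['\n'] ((qSplit cs cur).map (fun l => '>' :: ' ' :: l)) =
      '>' :: ' ' :: (cur.reverse ++ qRepl cs) := by
  induction cs generalizing cur with
  | nil => simp [qSplit, qRepl, PySem.Chars.join_singleton]
  | cons c t ih =>
    by_cases hc : c = '\n'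
    · subst hc
      simp only [qSplit, if_true, List.map_cons]
      obtain ⟨d, ds, hds⟩ : ∃ d ds, qSplit t [] = d :: ds := by
        cases hq : qSplit t [] with
        | nil => exact absurd hq (qSplit_ne_nil t [])
        | cons d ds => exact ⟨d, ds, rfl⟩
      have hI := ih ([] : List Char)
      rw [hds] at hI ⊢
      simp only [List.map_cons] at hI ⊢
      rw [PySem.Chars.join_cons_cons, hI]
      simp [qRepl]
    · simp only [qSplit, if_neg hc]
      rw [ih (c :: cur)]
      simp [qRepl, hc]

theorem foldl_push {α β : Type} (f : α → β) (ps : List α) (init : List β) :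
    ps.foldl (fun acc p => acc ++ [f p]) init = init ++ ps.map f := by
  induction ps generalizing init with
  | nil => simp
  | cons p t ih => simp [List.foldl, ih]

theorem newline_toList : "\n".toList = ['\n'] := rfl

theorem inner_paragraph (q : List Char) (hq : '\n' ∉ q) :
    PySem.Str.join "\n"
        (((PySem.Str.split? (String.ofList q) "\n").getD []).map (fun line => "> " ++ line)) =
      String.ofList ('>' :: ' ' :: q) := by
  have h1 : (PySem.Str.split? (String.ofList q) "\n").getD [] = [String.ofList q] := by
    simp [PySem.Str.split?, PySem.Chars.split?, newline_toList, splitOn_eq,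
      qSplit_no_newline q [] hq]
  rw [h1]
  apply String.toList_injective
  simp [PySem.Str.join, PySem.Chars.join_singleton]

theorem portA_toList (text : String) :
    (format_quote text).toList = '>' :: ' ' :: qRepl text.toList := by
  show (PySem.Str.join "\n" (List.foldl (fun acc paragraph => acc ++
      [PySem.Str.join "\n" (List.map (fun line => "> " ++ line)
        ((PySem.Str.split? paragraph "\n").getD []))]) []
      ((PySem.Str.split? text "\n").getD []))).toList = '>' :: ' ' :: qRepl text.toList
  rw [foldl_push]
  have hpar : (PySem.Str.split? text "\n").getD [] =
      (qSplit text.toList []).map String.ofList := by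
    simp [PySem.Str.split?, PySem.Chars.split?, newline_toList, splitOn_eq]
  rw [hpar, List.map_map]
  rw [List.map_congr_left (fun q hq => by
    show PySem.Str.join "\n"
        (((PySem.Str.split? (String.ofList q) "\n").getD []).map (fun line => "> " ++ line)) =
      String.ofList ('>' :: ' ' :: q)
    exact inner_paragraph q (qSplit_pieces_no_newline text.toList [] (by simp) q hq))]
  simp only [PySem.Str.join, String.toList_ofList, List.nil_append, List.map_map]
  have : (String.toList ∘ String.ofList) ∘ (fun q => '>' :: ' ' :: q) =
      (fun q : List Char => '>' :: ' ' :: q) := by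
    funext q; simp
  rw [show String.toList ∘ (fun q : List Char => String.ofList ('>' :: ' ' :: q)) =
      (fun q : List Char => '>' :: ' ' :: q) from funext (fun q => by simp)]
  simpa [newline_toList] using join_map_qSplit text.toList []

theorem portB_toList (text : String) :
    (format_quote_alt text).toList = '>' :: ' ' :: qRepl text.toList := by
  unfold format_quote_alt
  have : PySem.Str.replace text "\n" "\n> " =
      String.ofList (qRepl text.toList) := by
    simp [PySem.Str.replace, newline_toList]
    rw [replace_eq]
  rw [this]
  simp

-- ===== VERDICT (by name: the statement is the Claim_ definition above) =====
theorem format_quote_spec : Claim_equal_format_quote := by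
  intro text _
  unfold Spec_format_quote
  apply String.toList_injective
  rw [portA_toList, portB_toList]
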